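-- pv_equiv track=rewrite | github.com/darakna/Playground | Pyton_stuff/wordle_hon.py | generate_strings
-- ===== SOURCE A (Python) =====
-- def generate_strings(input_list):
--     if not input_list:
--         return []
--
--     first, *rest = input_list
--     if not rest:
--         return [first]
--
--     rest_combinations = generate_strings(rest)
--     result = []
--
--     for combination in rest_combinations:
--         result.append(first + combination)
--         result.append(combination + first)
--
--     return result
-- ===== SOURCE B (Python) =====
-- def generate_strings(input_list):
--     if not input_list:
--         return []
--     combos = [input_list[-1]]
--     for el in reversed(input_list[:-1]):
--         combos = [s for c in combos for s in (el + c, c + el)]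
--     return combos
-- ===== Notes on version B (the rewrite author's own statement) =====
-- stated objective: alternative
-- what changed: Replaced head-first recursion with an iterative left fold: start from the last element and rebuild the combination list once per remaining element in reverse order, via a flat comprehension instead of a per-item append loop.
import Mathlib
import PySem

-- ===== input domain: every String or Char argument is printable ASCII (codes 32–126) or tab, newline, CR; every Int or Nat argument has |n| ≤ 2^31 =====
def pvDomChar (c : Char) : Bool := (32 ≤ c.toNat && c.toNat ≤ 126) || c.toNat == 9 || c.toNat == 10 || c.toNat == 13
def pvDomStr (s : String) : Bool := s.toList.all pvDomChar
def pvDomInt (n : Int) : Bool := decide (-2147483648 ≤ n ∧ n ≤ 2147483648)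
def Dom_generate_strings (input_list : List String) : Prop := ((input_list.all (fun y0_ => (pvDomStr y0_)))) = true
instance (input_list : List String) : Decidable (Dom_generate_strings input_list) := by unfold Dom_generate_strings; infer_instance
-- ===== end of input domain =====

-- B rebuilds the result iteratively over the reversed prefix instead of A's head-first recursion; objective: alternative decomposition, same cost.

-- ===== PORT A =====
def generate_strings (input_list : List String) : List String :=
  match input_list with
  | [] => []
  | first :: rest =>
    if rest = [] then [first]
    else
      (generate_strings rest).foldl (fun result combination => result ++ [first ++ combination, combination ++ first]) []

-- ===== PORT B =====
-- the list comprehension [s for c in combos for s in (el + c, c + el)]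
def gsStep (combos : List String) (el : String) : List String :=
  combos.flatMap (fun c => [el ++ c, c ++ el])

def generate_strings_alt (input_list : List String) : List String :=
  match input_list with
  | [] => []
  | l => (l.dropLast.reverse).foldl gsStep [l.getLastD ""]

-- ===== PRECONDITION & SPEC =====
def Spec_generate_strings (input_list : List String) (out : List String) : Prop := out = generate_strings_alt input_list
instance (input_list : List String) (out : List String) : Decidable (Spec_generate_strings input_list out) := by unfold Spec_generate_strings; infer_instance

-- ===== CLAIM (what is proved, stated in full; the proofs are below) =====
def Claim_equal_generate_strings : Prop := ∀ (input_list : List String), Dom_generate_strings input_list → Spec_generate_strings input_list (generate_strings input_list)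

-- ===== LEMMAS AND PROOFS =====
theorem foldl_pairs (f g : String → String) (l acc : List String) :
    l.foldl (fun r c => r ++ [f c, g c]) acc = acc ++ l.flatMap (fun c => [f c, g c]) := by
  induction l generalizing acc with
  | nil => simp
  | cons x xs ih => simp [List.foldl, ih]

theorem gs_cons (x : String) (xs : List String) :
    generate_strings (x :: xs) = ((x :: xs).dropLast.reverse).foldl gsStep [(x :: xs).getLastD ""] := by
  induction xs generalizing x with
  | nil => simp [generate_strings]
  | cons y ys ih =>
    have h : generate_strings (x :: y :: ys)
        = gsStep (generate_strings (y :: ys)) x := by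
      simp [generate_strings, gsStep, foldl_pairs (fun c => x ++ c) (fun c => c ++ x)]
    rw [h, ih y]
    simp [gsStep]

theorem generate_strings_spec : Claim_equal_generate_strings := by
  intro l _
  unfold Spec_generate_strings
  match l with
  | [] => rfl
  | x :: xs => rw [gs_cons]; rfl
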